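-- pv_equiv track=rewrite | github.com/huangnengCSU/NanoSNP | HaplotypeModel/get_truth.py | gt21_enum_from
-- ===== SOURCE A (Python) =====
-- GT21_LABELS_MAP = {
--     "AA": 0,
--     "AC": 1,
--     "AG": 2,
--     "AT": 3,
--     "CC": 4,
--     "CG": 5,
--     "CT": 6,
--     "GG": 7,
--     "GT": 8,
--     "TT": 9,
--     "DelDel": 10,
--     "ADel": 11,
--     "CDel": 12,
--     "GDel": 13,
--     "TDel": 14,
--     "InsIns": 15,
--     "AIns": 16,
--     "CIns": 17,
--     "GIns": 18,
--     "TIns": 19,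
--     "InsDel": 20
-- }
--
-- def partial_label_from(ref, alt):
--     if len(ref) > len(alt):
--         result = "Del"
--     elif len(ref) < len(alt):
--         result = "Ins"
--     else:
--         result = alt[0]
--     return result
--
-- def mix_two_partial_labels(label1, label2):
--     if len(label1) == 1 and len(label2) == 1:
--         # A, C, G, T
--         result = ""
--         if label1 <= label2:
--             result += label1
--             result += label2
--         else:
--             result += label2
--             result += label1
--         return result
--     tlb1 = label1  # Ins
--     tlb2 = label2  # A
--     if len(label1) > 1 and len(label2) == 1:
--         # Ins, A
--         tlb1 = label2  # A
--         tlb2 = label1  # Ins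
--     if len(tlb2) > 1 and len(tlb1) == 1:
--         return tlb1 + tlb2
--     if len(label1) > 0 and len(label2) > 0 and label1 == label2:
--         # InsIns, DelDel
--         return label1 + label2
--     return "InsDel"
--
-- def gt21_enum_from(reference, alternate, genotype_1, genotype_2, alternate_arr):
--     if len(alternate_arr) > 0:
--         partial_labels = []
--         for alt in alternate_arr:
--             partial_labels.append(partial_label_from(reference, alt))
--         gt21_label = mix_two_partial_labels(partial_labels[0], partial_labels[1])  # 'Ins, Del, A, C, G, T'
--         return GT21_LABELS_MAP[gt21_label]
--
--     alternate_arr = alternate.split(',')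
--     if len(alternate_arr) == 1:
--         alternate_arr.clear()
--         if genotype_1 == 0 or genotype_2 == 0:
--             alternate_arr.append(reference)
--             alternate_arr.append(alternate)
--         else:
--             alternate_arr.append(alternate)
--             alternate_arr.append(alternate)
--     partial_labels = []
--     for alt in alternate_arr:
--         partial_labels.append(partial_label_from(reference, alt))
--     gt21_label = mix_two_partial_labels(partial_labels[0], partial_labels[1])
--     return GT21_LABELS_MAP[gt21_label]
-- ===== SOURCE B (Python) =====
-- # Arithmetic re-implementation: each allele maps to an ordinal 0..5 (A,C,G,T,Ins,Del);
-- # the GT21 code is computed by a closed formula on the ordered ordinal pair (no label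
-- # strings, no dictionary lookup).
--
-- def _ordinal(reference, alt):
--     if len(reference) > len(alt):
--         return 5  # Del
--     if len(reference) < len(alt):
--         return 4  # Ins
--     return "ACGT".index(alt[0])
--
-- def gt21_enum_from(reference, alternate, genotype_1, genotype_2, alternate_arr):
--     if not alternate_arr:
--         alternate_arr = alternate.split(',')
--         if len(alternate_arr) == 1:
--             if genotype_1 == 0 or genotype_2 == 0:
--                 alternate_arr = [reference, alternate]
--             else:
--                 alternate_arr = [alternate, alternate]
--     o1 = _ordinal(reference, alternate_arr[0])
--     o2 = _ordinal(reference, alternate_arr[1])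
--     i, j = (o1, o2) if o1 <= o2 else (o2, o1)
--     if j <= 3:
--         return i * 4 - i * (i + 1) // 2 + j
--     if j == 4:
--         return 15 if i == 4 else 16 + i
--     return 10 if i == 5 else (20 if i == 4 else 11 + i)
-- ===== Notes on version B (the rewrite author's own statement) =====
-- stated objective: simpler
-- what changed: B drops A's branchy two-label string mixing and the 21-entry GT21 dictionary: each allele is encoded directly as an ordinal 0..5 (A,C,G,T,Ins,Del) and the GT21 code is computed by a closed arithmetic formula on the ordered ordinal pair; B also only examines the two alleles that determine the result instead of labelling the whole list.
-- outside the precondition, e.g. on gt21_enum_from('A', 'C', 1, 1, ['C']): A raises IndexError, B raises IndexError; on gt21_enum_from('A', 'X', 1, 1, []): A raises KeyError, B raises ValueError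
import Mathlib
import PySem

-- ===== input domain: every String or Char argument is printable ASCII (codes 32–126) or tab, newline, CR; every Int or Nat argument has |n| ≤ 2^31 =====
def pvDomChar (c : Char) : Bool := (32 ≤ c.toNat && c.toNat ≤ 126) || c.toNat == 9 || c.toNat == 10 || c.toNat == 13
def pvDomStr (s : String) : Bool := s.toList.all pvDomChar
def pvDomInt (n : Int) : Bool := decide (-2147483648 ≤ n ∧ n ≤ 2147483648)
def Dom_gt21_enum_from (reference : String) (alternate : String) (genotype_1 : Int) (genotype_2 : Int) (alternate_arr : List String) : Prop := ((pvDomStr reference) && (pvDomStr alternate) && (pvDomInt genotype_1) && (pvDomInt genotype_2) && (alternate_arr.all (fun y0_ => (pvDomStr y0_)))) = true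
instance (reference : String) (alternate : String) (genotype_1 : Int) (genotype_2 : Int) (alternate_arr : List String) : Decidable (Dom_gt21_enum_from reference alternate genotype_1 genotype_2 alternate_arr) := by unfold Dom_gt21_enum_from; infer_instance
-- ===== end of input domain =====

-- B replaces A's branchy label mixing and 21-entry GT21 dictionary by an ordinal encoding
-- (A,C,G,T,Ins,Del -> 0..5) and a closed arithmetic formula on the ordered ordinal pair (objective: simpler).

-- ===== PORT A =====
def pvGT21Map : PySem.Dict String Int := PySem.Dict.mk
  [("AA", 0), ("AC", 1), ("AG", 2), ("AT", 3), ("CC", 4), ("CG", 5), ("CT", 6),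
   ("GG", 7), ("GT", 8), ("TT", 9), ("DelDel", 10), ("ADel", 11), ("CDel", 12),
   ("GDel", 13), ("TDel", 14), ("InsIns", 15), ("AIns", 16), ("CIns", 17),
   ("GIns", 18), ("TIns", 19), ("InsDel", 20)]

def partial_label_from (ref : String) (alt : String) : String :=
  if PySem.Str.len ref > PySem.Str.len alt then "Del"
  else if PySem.Str.len ref < PySem.Str.len alt then "Ins"
  else match PySem.Str.pyGet? alt 0 with   -- alt[0]; none = IndexError, excluded by Pre_
       | some c => String.ofList [c]
       | none => ""

def mix_two_partial_labels (label1 : String) (label2 : String) : String :=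
  if PySem.Str.len label1 == 1 && PySem.Str.len label2 == 1 then
    -- Python's label1 <= label2 is ¬(label2 < label1), code-point lexicographic
    (if !(PySem.Chars.strLt label2.toList label1.toList) then
       String.ofList (label1.toList ++ label2.toList)
     else String.ofList (label2.toList ++ label1.toList))
  else
    let p := if PySem.Str.len label1 > 1 && PySem.Str.len label2 == 1
             then (label2, label1) else (label1, label2)
    if PySem.Str.len p.2 > 1 && PySem.Str.len p.1 == 1 then
      String.ofList (p.1.toList ++ p.2.toList)
    else if PySem.Str.len label1 > 0 && PySem.Str.len label2 > 0 && label1 == label2 then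
      String.ofList (label1.toList ++ label2.toList)
    else "InsDel"

def gt21_enum_from (reference : String) (alternate : String) (genotype_1 : Int) (genotype_2 : Int) (alternate_arr : List String) : Int :=
  if alternate_arr.length > 0 then
    let partial_labels := alternate_arr.foldl (fun acc alt => acc ++ [partial_label_from reference alt]) []
    -- partial_labels[1] raises IndexError when absent; missing key raises KeyError: both excluded by Pre_
    let gt21_label := mix_two_partial_labels (partial_labels.getD 0 "") (partial_labels.getD 1 "")
    (PySem.Dict.get? pvGT21Map gt21_label).getD 0
  else
    let arr0 := (PySem.Str.split? alternate ",").getD []  -- separator "," ≠ "": always some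
    let arr := if arr0.length == 1 then
        (if genotype_1 == 0 || genotype_2 == 0 then [reference, alternate] else [alternate, alternate])
      else arr0
    let partial_labels := arr.foldl (fun acc alt => acc ++ [partial_label_from reference alt]) []
    let gt21_label := mix_two_partial_labels (partial_labels.getD 0 "") (partial_labels.getD 1 "")
    (PySem.Dict.get? pvGT21Map gt21_label).getD 0

-- ===== PORT B =====
def pvOrdinal (reference : String) (alt : String) : Int :=
  if PySem.Str.len reference > PySem.Str.len alt then 5
  else if PySem.Str.len reference < PySem.Str.len alt then 4
  else match PySem.Str.pyGet? alt 0 with   -- alt[0]; none = IndexError, excluded by Pre_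
       | some c => ((PySem.List.index? "ACGT".toList c).map Int.ofNat).getD 0  -- .index: ValueError when absent, excluded by Pre_
       | none => 0

def gt21_enum_from_alt (reference : String) (alternate : String) (genotype_1 : Int) (genotype_2 : Int) (alternate_arr : List String) : Int :=
  let arr := if alternate_arr.isEmpty then
      (let arr0 := (PySem.Str.split? alternate ",").getD []  -- separator "," ≠ "": always some
       if arr0.length == 1 then
         (if genotype_1 == 0 || genotype_2 == 0 then [reference, alternate] else [alternate, alternate])
       else arr0)
    else alternate_arr
  let o1 := pvOrdinal reference (arr.getD 0 "")
  let o2 := pvOrdinal reference (arr.getD 1 "")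
  let ij := if o1 ≤ o2 then (o1, o2) else (o2, o1)
  let i := ij.1
  let j := ij.2
  if j ≤ 3 then i * 4 - PySem.Int.floordiv (i * (i + 1)) 2 + j
  else if j == 4 then (if i == 4 then 15 else 16 + i)
  else if i == 5 then 10 else if i == 4 then 20 else 11 + i

-- ===== PRECONDITION & SPEC =====
-- the effective two-or-more element allele list A and B both work on (Pre_-only helper)
def pvPreArr (reference : String) (alternate : String) (genotype_1 : Int) (genotype_2 : Int) (alternate_arr : List String) : List String :=
  if alternate_arr.isEmpty then
    (let arr0 := (PySem.Str.split? alternate ",").getD []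
     if arr0.length == 1 then
       (if genotype_1 == 0 || genotype_2 == 0 then [reference, alternate] else [alternate, alternate])
     else arr0)
  else alternate_arr

def pvEqLenNonEmpty (reference : String) (alt : String) : Bool :=
  PySem.Str.len reference != PySem.Str.len alt || !alt.toList.isEmpty

def pvOkHead (reference : String) (alt : String) : Bool :=
  PySem.Str.len reference != PySem.Str.len alt ||
    (match alt.toList.head? with
     | some c => (['A', 'C', 'G', 'T'] : List Char).contains c
     | none => false)

-- Pre_ excludes exactly the inputs on which Python A raises: an effective allele list shorter
-- than two (IndexError), an equal-length empty allele anywhere in it (IndexError on alt[0]),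
-- or a first/second allele of reference length whose leading base is not A/C/G/T (KeyError
-- in the GT21 table).
def Pre_gt21_enum_from (reference : String) (alternate : String) (genotype_1 : Int) (genotype_2 : Int) (alternate_arr : List String) : Prop :=
  (let e := pvPreArr reference alternate genotype_1 genotype_2 alternate_arr
   decide (2 ≤ e.length) && e.all (pvEqLenNonEmpty reference) &&
     pvOkHead reference (e.getD 0 "") && pvOkHead reference (e.getD 1 "")) = true
instance (reference : String) (alternate : String) (genotype_1 : Int) (genotype_2 : Int) (alternate_arr : List String) : Decidable (Pre_gt21_enum_from reference alternate genotype_1 genotype_2 alternate_arr) := by unfold Pre_gt21_enum_from; infer_instance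

def pvWitness_gt21_enum_from : String × String × Int × Int × List String := ("A", "C", 1, 1, [])

def Spec_gt21_enum_from (reference : String) (alternate : String) (genotype_1 : Int) (genotype_2 : Int) (alternate_arr : List String) (out : Int) : Prop := out = gt21_enum_from_alt reference alternate genotype_1 genotype_2 alternate_arr
instance (reference : String) (alternate : String) (genotype_1 : Int) (genotype_2 : Int) (alternate_arr : List String) (out : Int) : Decidable (Spec_gt21_enum_from reference alternate genotype_1 genotype_2 alternate_arr out) := by unfold Spec_gt21_enum_from; infer_instance

-- ===== CLAIM (what is proved, stated in full; the proofs are below) =====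
def Claim_equal_gt21_enum_from : Prop := ∀ (reference : String) (alternate : String) (genotype_1 : Int) (genotype_2 : Int) (alternate_arr : List String), Dom_gt21_enum_from reference alternate genotype_1 genotype_2 alternate_arr → Pre_gt21_enum_from reference alternate genotype_1 genotype_2 alternate_arr → Spec_gt21_enum_from reference alternate genotype_1 genotype_2 alternate_arr (gt21_enum_from reference alternate genotype_1 genotype_2 alternate_arr)

-- ===== LEMMAS AND PROOFS =====
-- the six possible partial labels, indexed by B's ordinal
def pvLabelOfOrd : Fin 6 → String
  | 0 => "A" | 1 => "C" | 2 => "G" | 3 => "T" | 4 => "Ins" | 5 => "Del"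

-- On an admitted allele, A's partial label is one of the six canonical labels and
-- B's ordinal is exactly that label's index.
lemma pvOrdinal_spec (reference alt : String)
    (h1 : pvEqLenNonEmpty reference alt = true) (h2 : pvOkHead reference alt = true) :
    ∃ k : Fin 6, partial_label_from reference alt = pvLabelOfOrd k ∧
      pvOrdinal reference alt = ((k : Nat) : Int) := by
  by_cases hgt : PySem.Str.len reference > PySem.Str.len alt
  · exact ⟨5, by
      refine ⟨?_, ?_⟩ <;> simp only [partial_label_from, pvOrdinal] <;>
        rw [if_pos hgt] <;> decide⟩
  · by_cases hlt : PySem.Str.len reference < PySem.Str.len alt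
    · exact ⟨4, by
        refine ⟨?_, ?_⟩ <;> simp only [partial_label_from, pvOrdinal] <;>
          rw [if_neg hgt, if_pos hlt] <;> decide⟩
    · have heq : PySem.Str.len reference = PySem.Str.len alt :=
        le_antisymm (not_lt.1 hgt) (not_lt.1 hlt)
      simp only [pvEqLenNonEmpty, pvOkHead, heq, bne_self_eq_false, Bool.false_or] at h1 h2
      obtain ⟨c, cs, hc⟩ : ∃ c cs, alt.toList = c :: cs := by
        cases h : alt.toList with
        | nil => simp [h] at h1
        | cons c cs => exact ⟨c, cs, rfl⟩
      rw [hc] at h2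
      simp only [List.head?_cons, List.contains_eq_mem, List.mem_cons, List.not_mem_nil,
        or_false, decide_eq_true_eq] at h2
      have hget : ∀ d : Char, alt.toList = d :: cs → PySem.Str.pyGet? alt 0 = some d := by
        intro d hd; simp [pysem, hd]
      rcases h2 with rfl | rfl | rfl | rfl
      · exact ⟨0, by
          refine ⟨?_, ?_⟩ <;> simp only [partial_label_from, pvOrdinal] <;>
            rw [if_neg hgt, if_neg hlt, hget _ hc] <;> decide⟩
      · exact ⟨1, by
          refine ⟨?_, ?_⟩ <;> simp only [partial_label_from, pvOrdinal] <;>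
            rw [if_neg hgt, if_neg hlt, hget _ hc] <;> decide⟩
      · exact ⟨2, by
          refine ⟨?_, ?_⟩ <;> simp only [partial_label_from, pvOrdinal] <;>
            rw [if_neg hgt, if_neg hlt, hget _ hc] <;> decide⟩
      · exact ⟨3, by
          refine ⟨?_, ?_⟩ <;> simp only [partial_label_from, pvOrdinal] <;>
            rw [if_neg hgt, if_neg hlt, hget _ hc] <;> decide⟩

-- The 36-case core: A's label-mixing + dictionary lookup equals B's arithmetic formula
-- on the pair of ordinals.
lemma pvMix_code (i j : Fin 6) :
    (PySem.Dict.get? pvGT21Map (mix_two_partial_labels (pvLabelOfOrd i) (pvLabelOfOrd j))).getD 0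
      = (let o1 : Int := ((i : Nat) : Int)
         let o2 : Int := ((j : Nat) : Int)
         let ij := if o1 ≤ o2 then (o1, o2) else (o2, o1)
         let a := ij.1
         let b := ij.2
         if b ≤ 3 then a * 4 - PySem.Int.floordiv (a * (a + 1)) 2 + b
         else if b == 4 then (if a == 4 then 15 else 16 + a)
         else if a == 5 then 10 else if a == 4 then 20 else 11 + a) := by
  revert i j; decide

-- On any effective allele list admitted by Pre_, A's whole tail computation equals B's.
lemma pvBridge (reference : String) (e : List String)
    (hlen : 2 ≤ e.length) (hall : e.all (pvEqLenNonEmpty reference) = true)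
    (h0 : pvOkHead reference (e.getD 0 "") = true) (h1 : pvOkHead reference (e.getD 1 "") = true) :
    (PySem.Dict.get? pvGT21Map (mix_two_partial_labels
        ((e.foldl (fun acc alt => acc ++ [partial_label_from reference alt]) []).getD 0 "")
        ((e.foldl (fun acc alt => acc ++ [partial_label_from reference alt]) []).getD 1 ""))).getD 0
      = (let o1 := pvOrdinal reference (e.getD 0 "")
         let o2 := pvOrdinal reference (e.getD 1 "")
         let ij := if o1 ≤ o2 then (o1, o2) else (o2, o1)
         let i := ij.1
         let j := ij.2
         if j ≤ 3 then i * 4 - PySem.Int.floordiv (i * (i + 1)) 2 + j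
         else if j == 4 then (if i == 4 then 15 else 16 + i)
         else if i == 5 then 10 else if i == 4 then 20 else 11 + i) := by
  match e, hlen with
  | x0 :: x1 :: rest, _ =>
    simp only [List.getD_cons_zero, List.getD_cons_succ] at h0 h1 ⊢
    simp only [List.all_cons, Bool.and_eq_true] at hall
    rw [PySem.List.foldl_append_singleton_eq_map]
    simp only [List.nil_append, List.map_cons, List.getD_cons_zero, List.getD_cons_succ]
    obtain ⟨k0, hl0, ho0⟩ := pvOrdinal_spec reference x0 hall.1 h0
    obtain ⟨k1, hl1, ho1⟩ := pvOrdinal_spec reference x1 hall.2.1 h1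
    rw [hl0, hl1, ho0, ho1]
    exact pvMix_code k0 k1

-- ===== VERDICT (by name: the statement is the Claim_ definition above) =====
theorem gt21_enum_from_spec : Claim_equal_gt21_enum_from := by
  intro reference alternate genotype_1 genotype_2 alternate_arr _ hPre
  unfold Spec_gt21_enum_from
  unfold Pre_gt21_enum_from at hPre
  simp only [Bool.and_eq_true, decide_eq_true_eq] at hPre
  obtain ⟨⟨⟨hlen, hall⟩, h0⟩, h1⟩ := hPre
  cases alternate_arr with
  | nil =>
    simp only [pvPreArr, List.isEmpty_nil] at hlen hall h0 h1
    unfold gt21_enum_from gt21_enum_from_alt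
    simp only [List.length_nil, gt_iff_lt, lt_self_iff_false, if_false, List.isEmpty_nil]
    exact pvBridge reference _ hlen hall h0 h1
  | cons a as =>
    simp only [pvPreArr, List.isEmpty_cons, Bool.false_eq_true, if_false] at hlen hall h0 h1
    unfold gt21_enum_from gt21_enum_from_alt
    simp only [List.length_cons, List.isEmpty_cons, Bool.false_eq_true, if_false,
      if_pos (Nat.succ_pos as.length)]
    exact pvBridge reference _ hlen hall h0 h1
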